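-- pv_equiv track=rewrite | github.com/hammershock/FashionDescription | metrics.py | _find_chunks
-- ===== SOURCE A (Python) =====
-- def _find_chunks(candidate, reference):
--     """寻找chunks（连续匹配单词序列）"""
--     candidate_chunks = []
--     reference_chunks = []
--     chunk = []
--
--     for word in candidate:
--         if word in reference:
--             if not chunk:
--                 chunk_start = reference.index(word)
--             chunk.append(word)
--         else:
--             if chunk:
--                 candidate_chunks.append(chunk)
--                 reference_chunks.append(reference[chunk_start:chunk_start+len(chunk)])
--                 chunk = []
--
--     if chunk:  # 处理最后一个chunk
--         candidate_chunks.append(chunk)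
--         reference_chunks.append(reference[chunk_start:chunk_start+len(chunk)])
--
--     return candidate_chunks, reference_chunks
-- ===== SOURCE B (Python) =====
-- def _find_chunks(candidate, reference):
--     """Scan candidate with two indices: each maximal run of words present in
--     reference becomes one chunk, sliced out in one go (no accumulator/flush)."""
--     candidate_chunks = []
--     reference_chunks = []
--     i, n = 0, len(candidate)
--     while i < n:
--         if candidate[i] in reference:
--             j = i + 1
--             while j < n and candidate[j] in reference:
--                 j += 1
--             chunk = candidate[i:j]
--             start = reference.index(chunk[0])
--             candidate_chunks.append(chunk)
--             reference_chunks.append(reference[start:start + len(chunk)])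
--             i = j
--         else:
--             i += 1
--     return candidate_chunks, reference_chunks
-- ===== Notes on version B (the rewrite author's own statement) =====
-- stated objective: alternative
-- what changed: B replaces A's word-by-word accumulator with a separate last-chunk flush by a two-pointer scan that extracts each maximal matching run as one slice, with no chunk state or flush step.
import Mathlib
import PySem

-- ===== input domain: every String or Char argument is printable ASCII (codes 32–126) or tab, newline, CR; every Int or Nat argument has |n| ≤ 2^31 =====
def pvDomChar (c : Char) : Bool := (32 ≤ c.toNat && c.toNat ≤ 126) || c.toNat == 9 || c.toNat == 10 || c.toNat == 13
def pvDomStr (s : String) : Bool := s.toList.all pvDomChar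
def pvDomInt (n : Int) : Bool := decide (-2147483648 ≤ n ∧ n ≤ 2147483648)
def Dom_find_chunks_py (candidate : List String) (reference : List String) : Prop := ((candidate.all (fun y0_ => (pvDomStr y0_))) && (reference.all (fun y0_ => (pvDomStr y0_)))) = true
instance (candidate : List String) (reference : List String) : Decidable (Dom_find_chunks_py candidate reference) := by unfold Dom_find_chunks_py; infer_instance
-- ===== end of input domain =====

-- B replaces A's chunk accumulator + final flush with a two-pointer maximal-run scan (same cost, different decomposition).
-- ===== PORT A =====
-- reference[cs:cs+len]
def pvSlice (reference : List String) (cs len : Nat) : List String :=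
  PySem.List.slice reference (some (cs : Int)) (some ((cs : Int) + (len : Int)))

-- one iteration of A's for-loop; state = (candidate_chunks, reference_chunks, chunk, chunk_start)
def stepA (reference : List String)
    (s : List (List String) × List (List String) × List String × Nat) (word : String) :
    List (List String) × List (List String) × List String × Nat :=
  match s with
  | (cc, rc, chunk, cs) =>
    if reference.contains word then
      let cs' := if chunk.isEmpty then ((PySem.List.index? reference word).getD 0) else cs
      (cc, rc, chunk ++ [word], cs')
    else if chunk.isEmpty then (cc, rc, chunk, cs)
    else (cc ++ [chunk], rc ++ [pvSlice reference cs chunk.length], [], cs)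

def find_chunks_py (candidate : List String) (reference : List String) :
    List (List String) × List (List String) :=
  match candidate.foldl (stepA reference) ([], [], [], 0) with
  | (cc, rc, chunk, cs) =>
    if chunk.isEmpty then (cc, rc)
    else (cc ++ [chunk], rc ++ [pvSlice reference cs chunk.length])

-- ===== PORT B =====
-- two-pointer scan: each maximal run of words contained in reference is one chunk
def altGo (reference : List String) : List String → List (List String) × List (List String)
  | [] => ([], [])
  | w :: ws =>
    if reference.contains w then
      let chunk := w :: ws.takeWhile (fun x => reference.contains x)
      let rest := ws.dropWhile (fun x => reference.contains x)
      let start := (PySem.List.index? reference w).getD 0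
      let p := altGo reference rest
      (chunk :: p.1, pvSlice reference start chunk.length :: p.2)
    else altGo reference ws
  termination_by ws => ws.length
  decreasing_by
  · simpa using Nat.lt_succ_of_le (List.length_dropWhile_le _ _)
  · simp

def find_chunks_py_alt (candidate : List String) (reference : List String) :
    List (List String) × List (List String) :=
  altGo reference candidate

-- ===== PRECONDITION & SPEC =====
def Spec_find_chunks_py (candidate : List String) (reference : List String) (out : List (List String) × List (List String)) : Prop := out = find_chunks_py_alt candidate reference
instance (candidate : List String) (reference : List String) (out : List (List String) × List (List String)) : Decidable (Spec_find_chunks_py candidate reference out) := by unfold Spec_find_chunks_py; infer_instance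

-- ===== CLAIM (what is proved, stated in full; the proofs are below) =====
def Claim_equal_find_chunks_py : Prop := ∀ (candidate : List String) (reference : List String), Dom_find_chunks_py candidate reference → Spec_find_chunks_py candidate reference (find_chunks_py candidate reference)

-- ===== LEMMAS AND PROOFS =====

-- flush of A's final state
def flushA (reference : List String)
    (s : List (List String) × List (List String) × List String × Nat) :
    List (List String) × List (List String) :=
  match s with
  | (cc, rc, chunk, cs) =>
    if chunk.isEmpty then (cc, rc)
    else (cc ++ [chunk], rc ++ [pvSlice reference cs chunk.length])

theorem find_chunks_py_eq_flush (candidate reference : List String) :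
    find_chunks_py candidate reference
      = flushA reference (candidate.foldl (stepA reference) ([], [], [], 0)) := rfl

-- the key mutual invariant, by strong induction on the remaining candidate length
theorem keyA (reference : List String) : ∀ (n : Nat) (ws : List String), ws.length ≤ n →
    (∀ cc rc cs, flushA reference (ws.foldl (stepA reference) (cc, rc, [], cs))
        = (cc ++ (altGo reference ws).1, rc ++ (altGo reference ws).2)) ∧
    (∀ cc rc (chunk : List String) cs, chunk ≠ [] →
      flushA reference (ws.foldl (stepA reference) (cc, rc, chunk, cs))
        = (cc ++ [chunk ++ ws.takeWhile (fun x => reference.contains x)]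
              ++ (altGo reference (ws.dropWhile (fun x => reference.contains x))).1,
           rc ++ [pvSlice reference cs (chunk ++ ws.takeWhile (fun x => reference.contains x)).length]
              ++ (altGo reference (ws.dropWhile (fun x => reference.contains x))).2)) := by
  intro n
  induction n with
  | zero =>
    intro ws hws
    have hws0 : ws = [] := List.eq_nil_of_length_eq_zero (Nat.le_zero.mp hws)
    subst hws0
    constructor
    · intro cc rc cs; simp [flushA, altGo]
    · intro cc rc chunk cs hch
      simp [flushA, altGo, List.isEmpty_iff, hch]
  | succ n ih =>
    intro ws hws
    cases ws with
    | nil =>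
      constructor
      · intro cc rc cs; simp [flushA, altGo]
      · intro cc rc chunk cs hch
        simp [flushA, altGo, List.isEmpty_iff, hch]
    | cons w ws =>
      have hlen : ws.length ≤ n := by simpa using hws
      constructor
      · intro cc rc cs
        by_cases hw : w ∈ reference
        · have hstep : stepA reference (cc, rc, [], cs) w
              = (cc, rc, [w], (PySem.List.index? reference w).getD 0) := by
            simp [stepA, hw]
          rw [List.foldl_cons, hstep]
          rw [(ih ws hlen).2 cc rc [w] _ (by simp)]
          rw [show altGo reference (w :: ws)
              = ((w :: ws.takeWhile (fun x => reference.contains x))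
                    :: (altGo reference (ws.dropWhile (fun x => reference.contains x))).1,
                 pvSlice reference ((PySem.List.index? reference w).getD 0)
                    (w :: ws.takeWhile (fun x => reference.contains x)).length
                    :: (altGo reference (ws.dropWhile (fun x => reference.contains x))).2) from by
            rw [altGo]; simp [hw]]
          simp
        · have hstep : stepA reference (cc, rc, [], cs) w = (cc, rc, [], cs) := by
            simp [stepA, hw]
          rw [List.foldl_cons, hstep, (ih ws hlen).1 cc rc cs]
          rw [show altGo reference (w :: ws) = altGo reference ws from by rw [altGo]; simp [hw]]
      · intro cc rc chunk cs hch
        by_cases hw : w ∈ reference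
        · have hstep : stepA reference (cc, rc, chunk, cs) w = (cc, rc, chunk ++ [w], cs) := by
            simp [stepA, hw, List.isEmpty_iff, hch]
          rw [List.foldl_cons, hstep, (ih ws hlen).2 cc rc (chunk ++ [w]) cs (by simp)]
          simp [hw, Nat.add_comm]
        · have hstep : stepA reference (cc, rc, chunk, cs) w
              = (cc ++ [chunk], rc ++ [pvSlice reference cs chunk.length], [], cs) := by
            simp [stepA, hw, List.isEmpty_iff, hch]
          rw [List.foldl_cons, hstep, (ih ws hlen).1]
          simp [hw, show altGo reference (w :: ws) = altGo reference ws from by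
            rw [altGo]; simp [hw]]

-- ===== VERDICT (by name: the statement is the Claim_ definition above) =====
theorem find_chunks_py_spec : Claim_equal_find_chunks_py := by
  intro candidate reference _
  unfold Spec_find_chunks_py find_chunks_py_alt
  rw [find_chunks_py_eq_flush]
  have h := (keyA reference candidate.length candidate le_rfl).1 [] [] 0
  simpa using h
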